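-- pv_equiv track=rewrite | github.com/PranavAnand587/PCI-Backend | clean_and_repopulate.py | extract_category_occupation
-- ===== SOURCE A (Python) =====
-- def extract_category_occupation(affiliation):
--     """
--     Extracts a broad Category and a specific Occupation from the affiliation string.
--     """
--     if not isinstance(affiliation, str):
--         return "Individual", "Other"
--
--     aff_lower = affiliation.lower()
--
--     # ----- CATEGORY -----
--     if any(x in aff_lower for x in ['police','govt','government','ministry','department','magistrate','official','ias','ips']):
--         category = "Government"
--     elif any(x in aff_lower for x in ['bjp','congress','party','mla','mp','politician','leader']):
--         category = "Political"
--     elif any(x in aff_lower for x in ['editor','journalist','reporter','press','media','news','channel','paper']):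
--         category = "Media"
--     elif any(x in aff_lower for x in ['advocate','lawyer','legal','court']):
--         category = "Professional"
--     elif any(x in aff_lower for x in ['doctor','medical','hospital']):
--         category = "Professional"
--     elif any(x in aff_lower for x in ['manager','owner','director','company','ltd','pvt','corporate']):
--         category = "Business"
--     elif any(x in aff_lower for x in ['ngo','society','association','union','activist']):
--         category = "Civil Society"
--     else:
--         category = "Individual"
--
--     # ----- OCCUPATION -----
--     if any(x in aff_lower for x in ['police','sho','dgp','sp']):
--         occupation = "Police"
--     elif any(x in aff_lower for x in ['magistrate','dm','sdm','collector','commissioner','official','secretary']):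
--         occupation = "Official/Administrator"
--     elif any(x in aff_lower for x in ['mla','mp','minister','politician','party','leader','worker']):
--         occupation = "Politician"
--     elif any(x in aff_lower for x in ['judge','court','judicial']):
--         occupation = "Judiciary"
--     elif any(x in aff_lower for x in ['railway','defence','army']):
--         occupation = "Defence/Railways"
--     elif any(x in aff_lower for x in ['advocate','lawyer']):
--         occupation = "Legal Professional"
--     elif any(x in aff_lower for x in ['doctor','medical']):
--         occupation = "Medical Professional"
--     elif any(x in aff_lower for x in ['principal','teacher','professor','school','college']):
--         occupation = "Education"
--     elif any(x in aff_lower for x in ['editor','journalist','reporter','correspondent']):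
--         occupation = "Journalist/Media"
--     elif any(x in aff_lower for x in ['manager','owner','proprietor','director','business']):
--         occupation = "Business/Corporate"
--     elif 'activist' in aff_lower or 'social worker' in aff_lower or 'ngo' in aff_lower:
--         occupation = "Social Worker/Activist"
--     else:
--         occupation = "Other"
--
--     return category, occupation
-- ===== SOURCE B (Python) =====
-- # B: instead of an ordered if/elif chain of "keyword in s" tests, scan the string once by position; a keyword->rule-rank map lets each position lower the best
-- # (smallest) matched rule rank via startswith; the final rank indexes the label list.
--
-- _CATEGORY_LABELS = ["Government", "Political", "Media", "Professional",
--                     "Professional", "Business", "Civil Society"]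
-- _OCCUPATION_LABELS = ["Police", "Official/Administrator", "Politician", "Judiciary",
--                       "Defence/Railways", "Legal Professional", "Medical Professional",
--                       "Education", "Journalist/Media", "Business/Corporate",
--                       "Social Worker/Activist"]
--
-- _CAT_RANK = {kw: r for r, kws in enumerate([
--     ['police', 'govt', 'government', 'ministry', 'department', 'magistrate', 'official', 'ias', 'ips'],
--     ['bjp', 'congress', 'party', 'mla', 'mp', 'politician', 'leader'],
--     ['editor', 'journalist', 'reporter', 'press', 'media', 'news', 'channel', 'paper'],
--     ['advocate', 'lawyer', 'legal', 'court'],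
--     ['doctor', 'medical', 'hospital'],
--     ['manager', 'owner', 'director', 'company', 'ltd', 'pvt', 'corporate'],
--     ['ngo', 'society', 'association', 'union', 'activist'],
-- ]) for kw in kws}
--
-- _OCC_RANK = {kw: r for r, kws in enumerate([
--     ['police', 'sho', 'dgp', 'sp'],
--     ['magistrate', 'dm', 'sdm', 'collector', 'commissioner', 'official', 'secretary'],
--     ['mla', 'mp', 'minister', 'politician', 'party', 'leader', 'worker'],
--     ['judge', 'court', 'judicial'],
--     ['railway', 'defence', 'army'],
--     ['advocate', 'lawyer'],
--     ['doctor', 'medical'],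
--     ['principal', 'teacher', 'professor', 'school', 'college'],
--     ['editor', 'journalist', 'reporter', 'correspondent'],
--     ['manager', 'owner', 'proprietor', 'director', 'business'],
--     ['activist', 'social worker', 'ngo'],
-- ]) for kw in kws}
--
--
-- # keyword maps indexed by first character: at each position only the bucket of
-- # keywords that could start there is tried
-- _CAT_INDEX = {}
-- for _kw, _r in _CAT_RANK.items():
--     _CAT_INDEX.setdefault(_kw[0], []).append((_kw, _r))
-- _OCC_INDEX = {}
-- for _kw, _r in _OCC_RANK.items():
--     _OCC_INDEX.setdefault(_kw[0], []).append((_kw, _r))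
--
--
-- def extract_category_occupation(affiliation):
--     if not isinstance(affiliation, str):
--         return "Individual", "Other"
--     s = affiliation.lower()
--     n = len(s)
--     best_c = len(_CATEGORY_LABELS)
--     best_o = len(_OCCUPATION_LABELS)
--     i = 0
--     while i < n and (best_c or best_o):   # ranks can no longer drop once both are 0
--         c = s[i]
--         for kw, r in _CAT_INDEX.get(c, ()):
--             if r < best_c and s.startswith(kw, i):
--                 best_c = r
--         for kw, r in _OCC_INDEX.get(c, ()):
--             if r < best_o and s.startswith(kw, i):
--                 best_o = r
--         i += 1
--     category = _CATEGORY_LABELS[best_c] if best_c < len(_CATEGORY_LABELS) else "Individual"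
--     occupation = _OCCUPATION_LABELS[best_o] if best_o < len(_OCCUPATION_LABELS) else "Other"
--     return category, occupation
-- ===== Notes on version B (the rewrite author's own statement) =====
-- stated objective: alternative
-- what changed: Replaces A's two ordered if/elif chains of whole-string substring tests by a single positional scan that, via a first-character-indexed keyword-to-rule-rank map, minimizes the matched rule rank (first-match priority becomes minimum rank) and stops early once both ranks are 0, finally indexing label lists by the best rank.
import Mathlib
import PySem

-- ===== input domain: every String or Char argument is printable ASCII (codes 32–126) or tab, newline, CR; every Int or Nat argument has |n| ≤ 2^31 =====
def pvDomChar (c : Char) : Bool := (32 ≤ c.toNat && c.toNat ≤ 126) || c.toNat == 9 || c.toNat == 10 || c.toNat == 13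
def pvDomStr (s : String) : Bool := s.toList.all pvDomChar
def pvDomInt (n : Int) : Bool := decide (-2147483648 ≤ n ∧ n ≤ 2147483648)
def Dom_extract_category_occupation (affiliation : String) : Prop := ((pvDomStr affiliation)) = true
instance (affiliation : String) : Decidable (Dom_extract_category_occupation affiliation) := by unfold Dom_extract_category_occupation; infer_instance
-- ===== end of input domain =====

-- B replaces A's two ordered if/elif chains of substring tests by one scan over the
-- string's suffixes minimizing a keyword→rule-rank map (alternative, same cost).

-- ===== PORT A =====
def extract_category_occupation (affiliation : String) : String × String :=
  -- isinstance(affiliation, str) is always true under the type convention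
  let aff_lower := PySem.Str.lower affiliation
  let category :=
    if (["police","govt","government","ministry","department","magistrate","official","ias","ips"] : List String).any (fun x => PySem.Str.isIn x aff_lower) then "Government"
    else if (["bjp","congress","party","mla","mp","politician","leader"] : List String).any (fun x => PySem.Str.isIn x aff_lower) then "Political"
    else if (["editor","journalist","reporter","press","media","news","channel","paper"] : List String).any (fun x => PySem.Str.isIn x aff_lower) then "Media"
    else if (["advocate","lawyer","legal","court"] : List String).any (fun x => PySem.Str.isIn x aff_lower) then "Professional"
    else if (["doctor","medical","hospital"] : List String).any (fun x => PySem.Str.isIn x aff_lower) then "Professional"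
    else if (["manager","owner","director","company","ltd","pvt","corporate"] : List String).any (fun x => PySem.Str.isIn x aff_lower) then "Business"
    else if (["ngo","society","association","union","activist"] : List String).any (fun x => PySem.Str.isIn x aff_lower) then "Civil Society"
    else "Individual"
  let occupation :=
    if (["police","sho","dgp","sp"] : List String).any (fun x => PySem.Str.isIn x aff_lower) then "Police"
    else if (["magistrate","dm","sdm","collector","commissioner","official","secretary"] : List String).any (fun x => PySem.Str.isIn x aff_lower) then "Official/Administrator"
    else if (["mla","mp","minister","politician","party","leader","worker"] : List String).any (fun x => PySem.Str.isIn x aff_lower) then "Politician"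
    else if (["judge","court","judicial"] : List String).any (fun x => PySem.Str.isIn x aff_lower) then "Judiciary"
    else if (["railway","defence","army"] : List String).any (fun x => PySem.Str.isIn x aff_lower) then "Defence/Railways"
    else if (["advocate","lawyer"] : List String).any (fun x => PySem.Str.isIn x aff_lower) then "Legal Professional"
    else if (["doctor","medical"] : List String).any (fun x => PySem.Str.isIn x aff_lower) then "Medical Professional"
    else if (["principal","teacher","professor","school","college"] : List String).any (fun x => PySem.Str.isIn x aff_lower) then "Education"
    else if (["editor","journalist","reporter","correspondent"] : List String).any (fun x => PySem.Str.isIn x aff_lower) then "Journalist/Media"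
    else if (["manager","owner","proprietor","director","business"] : List String).any (fun x => PySem.Str.isIn x aff_lower) then "Business/Corporate"
    else if PySem.Str.isIn "activist" aff_lower || (PySem.Str.isIn "social worker" aff_lower || PySem.Str.isIn "ngo" aff_lower) then "Social Worker/Activist"
    else "Other"
  (category, occupation)

-- ===== PORT B =====
-- the dicts _CAT_RANK / _OCC_RANK of Source B (keyword → rule rank), as assoc lists in insertion order
def pvCatRank : List (String × Nat) :=
  [("police",0),("govt",0),("government",0),("ministry",0),("department",0),("magistrate",0),("official",0),("ias",0),("ips",0),
   ("bjp",1),("congress",1),("party",1),("mla",1),("mp",1),("politician",1),("leader",1),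
   ("editor",2),("journalist",2),("reporter",2),("press",2),("media",2),("news",2),("channel",2),("paper",2),
   ("advocate",3),("lawyer",3),("legal",3),("court",3),
   ("doctor",4),("medical",4),("hospital",4),
   ("manager",5),("owner",5),("director",5),("company",5),("ltd",5),("pvt",5),("corporate",5),
   ("ngo",6),("society",6),("association",6),("union",6),("activist",6)]

def pvOccRank : List (String × Nat) :=
  [("police",0),("sho",0),("dgp",0),("sp",0),
   ("magistrate",1),("dm",1),("sdm",1),("collector",1),("commissioner",1),("official",1),("secretary",1),
   ("mla",2),("mp",2),("minister",2),("politician",2),("party",2),("leader",2),("worker",2),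
   ("judge",3),("court",3),("judicial",3),
   ("railway",4),("defence",4),("army",4),
   ("advocate",5),("lawyer",5),
   ("doctor",6),("medical",6),
   ("principal",7),("teacher",7),("professor",7),("school",7),("college",7),
   ("editor",8),("journalist",8),("reporter",8),("correspondent",8),
   ("manager",9),("owner",9),("proprietor",9),("director",9),("business",9),
   ("activist",10),("social worker",10),("ngo",10)]

def pvCatLabels : List String :=
  ["Government","Political","Media","Professional","Professional","Business","Civil Society"]

def pvOccLabels : List String :=
  ["Police","Official/Administrator","Politician","Judiciary","Defence/Railways",
   "Legal Professional","Medical Professional","Education","Journalist/Media",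
   "Business/Corporate","Social Worker/Activist"]

-- the inner 'for kw, r in table.items(): if r < best and tail.startswith(kw): best = r'
def pvStep (tail : String) (table : List (String × Nat)) (best : Nat) : Nat :=
  table.foldl (fun b p => if decide (p.2 < b) && PySem.Str.startswith tail p.1 then p.2 else b) best

-- _CAT_INDEX/_OCC_INDEX: the table grouped by first character (insertion order kept),
-- looked up at key c; the grouped-dict lookup is exactly the in-order sublist = filter
def pvBucket (table : List (String × Nat)) (c : Char) : List (String × Nat) :=
  table.filter (fun p => p.1.toList.head? == some c)

-- the 'while i < n and (best_c or best_o): …; i += 1' loop: position i ↔ the suffix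
-- s[i:] (structural recursion over the suffixes); s[i] is its head,
-- s.startswith(kw, i) is startswith on it, and '(best_c or best_o)' is 'not both 0'
def pvScan (catT occT : List (String × Nat)) : List Char → Nat → Nat → Nat × Nat
  | [], bc, bo => (bc, bo)
  | c :: cs, bc, bo =>
      if bc == 0 && bo == 0 then (bc, bo)
      else pvScan catT occT cs (pvStep (String.ofList (c :: cs)) (pvBucket catT c) bc)
             (pvStep (String.ofList (c :: cs)) (pvBucket occT c) bo)

def extract_category_occupation_alt (affiliation : String) : String × String :=
  let s := PySem.Str.lower affiliation
  let bs := pvScan pvCatRank pvOccRank s.toList pvCatLabels.length pvOccLabels.length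
  -- _LABELS[best] if best < len(_LABELS) else default: the index is then in range, getD is exact
  ((if bs.1 < pvCatLabels.length then pvCatLabels.getD bs.1 "Individual" else "Individual"),
   (if bs.2 < pvOccLabels.length then pvOccLabels.getD bs.2 "Other" else "Other"))

-- ===== PRECONDITION & SPEC =====
def Spec_extract_category_occupation (affiliation : String) (out : String × String) : Prop := out = extract_category_occupation_alt affiliation
instance (affiliation : String) (out : String × String) : Decidable (Spec_extract_category_occupation affiliation out) := by unfold Spec_extract_category_occupation; infer_instance

-- ===== CLAIM (what is proved, stated in full; the proofs are below) =====
def Claim_equal_extract_category_occupation : Prop := ∀ (affiliation : String), Dom_extract_category_occupation affiliation → Spec_extract_category_occupation affiliation (extract_category_occupation affiliation)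

-- ===== LEMMAS AND PROOFS =====

-- abstract min-rank fold over a table, parametrised by the keyword predicate
def pvG (P : String → Bool) (t : List (String × Nat)) (b : Nat) : Nat :=
  t.foldl (fun acc p => if P p.1 then min acc p.2 else acc) b

-- single-table version of the scan
def pvScan1 (t : List (String × Nat)) : List Char → Nat → Nat
  | [], b => b
  | c :: cs, b => pvScan1 t cs (pvStep (String.ofList (c :: cs)) t b)

theorem pvStep_zero (tail : String) (t : List (String × Nat)) : pvStep tail t 0 = 0 := by
  induction t with
  | nil => rfl
  | cons p rest ih => simpa [pvStep, List.foldl_cons] using ih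

theorem pvScan1_zero (t : List (String × Nat)) (s : List Char) : pvScan1 t s 0 = 0 := by
  induction s with
  | nil => rfl
  | cons c cs ih => rw [pvScan1, pvStep_zero]; exact ih

-- scanning only the first-character bucket of the table is the same as scanning it all:
-- a keyword whose first character differs cannot start at this position
theorem pvStep_bucket (c : Char) (cs : List Char) (t : List (String × Nat)) (b : Nat)
    (hne : ∀ p ∈ t, p.1.toList ≠ []) :
    pvStep (String.ofList (c :: cs)) (pvBucket t c) b = pvStep (String.ofList (c :: cs)) t b := by
  induction t generalizing b with
  | nil => rfl
  | cons p rest ih =>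
      have hner : ∀ q ∈ rest, q.1.toList ≠ [] := fun q hq => hne q (by simp [hq])
      rcases hk : p.1.toList with _ | ⟨c', l'⟩
      · exact absurd hk (hne p (by simp))
      · by_cases hc : c' = c
        · rw [show pvBucket (p :: rest) c = p :: pvBucket rest c by
            simp [pvBucket, hk, hc]]
          simp only [pvStep, List.foldl_cons]
          exact ih _ hner
        · rw [show pvBucket (p :: rest) c = pvBucket rest c by
            simp [pvBucket, hk, hc]]
          rw [show pvStep (String.ofList (c :: cs)) (p :: rest) b = pvStep (String.ofList (c :: cs)) rest b by
            simp only [pvStep, List.foldl_cons]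
            have hsw : PySem.Str.startswith (String.ofList (c :: cs)) p.1 = false := by
              rw [Bool.eq_false_iff]
              intro hsw
              rw [PySem.Str.startswith_eq, PySem.Chars.startswith_iff, String.toList_ofList, hk] at hsw
              exact hc (List.cons_prefix_cons.mp hsw).1
            rw [PySem.Str.startswith_eq, String.toList_ofList] at hsw
            simp [hsw]]
          exact ih b hner

theorem pvScan_eq_pair (catT occT : List (String × Nat)) (s : List Char) (bc bo : Nat)
    (hcat : ∀ p ∈ catT, p.1.toList ≠ []) (hocc : ∀ p ∈ occT, p.1.toList ≠ []) :
    pvScan catT occT s bc bo = (pvScan1 catT s bc, pvScan1 occT s bo) := by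
  induction s generalizing bc bo with
  | nil => rfl
  | cons c cs ih =>
      rw [pvScan]
      by_cases h0 : bc == 0 && bo == 0
      · rw [if_pos h0]
        obtain ⟨hbc, hbo⟩ := by simpa using h0
        subst hbc; subst hbo
        rw [pvScan1, pvScan1, pvStep_zero, pvStep_zero, pvScan1_zero, pvScan1_zero]
      · rw [if_neg h0, pvStep_bucket _ _ _ _ hcat, pvStep_bucket _ _ _ _ hocc,
            ih, pvScan1, pvScan1]

theorem pvStep_eq_g (tail : String) (t : List (String × Nat)) (b : Nat) :
    pvStep tail t b = pvG (fun kw => PySem.Str.startswith tail kw) t b := by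
  induction t generalizing b with
  | nil => rfl
  | cons p rest ih =>
      simp only [pvStep, pvG, List.foldl_cons] at *
      rw [show (if decide (p.2 < b) && PySem.Str.startswith tail p.1 then p.2 else b)
            = (if PySem.Str.startswith tail p.1 then min b p.2 else b) by
          cases PySem.Str.startswith tail p.1
          · simp
          · by_cases h : p.2 < b <;> simp [h] <;> omega]
      exact ih _

theorem pvG_cons (P : String → Bool) (p : String × Nat) (t : List (String × Nat)) (b : Nat) :
    pvG P (p :: t) b = pvG P t (if P p.1 then min b p.2 else b) := rfl

theorem pvG_min (P : String → Bool) (t : List (String × Nat)) (b x : Nat) :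
    pvG P t (min b x) = min x (pvG P t b) := by
  induction t generalizing b with
  | nil => simp [pvG, Nat.min_comm]
  | cons p rest ih =>
      rw [pvG_cons, pvG_cons]
      cases h : P p.1
      · simp only [Bool.false_eq_true, if_false]
        exact ih b
      · simp only [if_true]
        rw [show min (min b x) p.2 = min (min b p.2) x by omega]
        exact ih _

theorem pvG_merge (P Q : String → Bool) (t : List (String × Nat)) (b : Nat) :
    pvG Q t (pvG P t b) = pvG (fun kw => P kw || Q kw) t b := by
  induction t generalizing b with
  | nil => rfl
  | cons p rest ih =>
      rw [pvG_cons, pvG_cons, pvG_cons]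
      rw [show (if Q p.1 then min (pvG P rest (if P p.1 then min b p.2 else b)) p.2
                else pvG P rest (if P p.1 then min b p.2 else b))
            = pvG P rest (if Q p.1 then min (if P p.1 then min b p.2 else b) p.2
                          else (if P p.1 then min b p.2 else b)) by
          cases hq : Q p.1
          · simp
          · simp only [if_true]
            rw [pvG_min, Nat.min_comm]]
      rw [ih]
      congr 1
      cases hp : P p.1 <;> cases hq : Q p.1 <;> simp

theorem pvG_congr (P Q : String → Bool) (t : List (String × Nat)) (b : Nat)
    (h : ∀ p ∈ t, P p.1 = Q p.1) : pvG P t b = pvG Q t b := by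
  induction t generalizing b with
  | nil => rfl
  | cons p rest ih =>
      simp only [pvG, List.foldl_cons] at *
      rw [h p (by simp)]
      exact ih _ (fun q hq => h q (by simp [hq]))

theorem pvG_of_no_match (P : String → Bool) (t : List (String × Nat)) (b : Nat)
    (h : ∀ p ∈ t, P p.1 = false) : pvG P t b = b := by
  induction t generalizing b with
  | nil => rfl
  | cons p rest ih =>
      simp only [pvG, List.foldl_cons, h p (by simp)]
      simp only [if_false, Bool.false_eq_true]
      exact ih _ (fun q hq => h q (by simp [hq]))

-- the scan over all suffixes computes the min rank of the keywords occurring anywhere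
theorem pvScan1_eq_g (t : List (String × Nat)) (s : List Char) (b : Nat)
    (hne : ∀ p ∈ t, p.1.toList ≠ []) :
    pvScan1 t s b = pvG (fun kw => PySem.Chars.isIn kw.toList s) t b := by
  induction s generalizing b with
  | nil =>
      rw [pvScan1]
      rw [pvG_of_no_match]
      intro p hp
      rw [PySem.Chars.isIn_eq_false_iff]
      intro hinf
      exact hne p hp (List.eq_nil_of_infix_nil hinf)
  | cons c cs ih =>
      rw [pvScan1, pvStep_eq_g, ih, pvG_merge]
      apply pvG_congr
      intro p _
      rw [Bool.eq_iff_iff]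
      simp only [Bool.or_eq_true, PySem.Str.startswith_eq, PySem.Chars.startswith_iff,
        PySem.Chars.isIn_iff_infix, String.toList_ofList]
      exact (List.infix_cons_iff).symm

-- grouping: a block of keywords sharing one rank folds to "if any matched then min acc r"
theorem pvG_block (P : String → Bool) (kws : List String) (r : Nat) (b : Nat) :
    pvG P (kws.map (fun kw => (kw, r))) b = if kws.any P then min b r else b := by
  induction kws generalizing b with
  | nil => simp [pvG]
  | cons kw rest ih =>
      simp only [List.map_cons, List.any_cons]
      rw [pvG_cons]
      by_cases h : P kw = true <;>
        simp only [h, Bool.false_eq_true, if_false, if_true, Bool.false_or, Bool.true_or] <;>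
        rw [ih]
      cases rest.any P <;> simp

theorem pvG_append (P : String → Bool) (t1 t2 : List (String × Nat)) (b : Nat) :
    pvG P (t1 ++ t2) b = pvG P t2 (pvG P t1 b) := by
  simp [pvG, List.foldl_append]

-- the two tables as concatenations of equal-rank blocks
theorem pvCatRank_blocks : pvCatRank =
    (["police","govt","government","ministry","department","magistrate","official","ias","ips"].map (fun kw => (kw, 0))) ++
    (["bjp","congress","party","mla","mp","politician","leader"].map (fun kw => (kw, 1))) ++
    (["editor","journalist","reporter","press","media","news","channel","paper"].map (fun kw => (kw, 2))) ++
    (["advocate","lawyer","legal","court"].map (fun kw => (kw, 3))) ++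
    (["doctor","medical","hospital"].map (fun kw => (kw, 4))) ++
    (["manager","owner","director","company","ltd","pvt","corporate"].map (fun kw => (kw, 5))) ++
    (["ngo","society","association","union","activist"].map (fun kw => (kw, 6))) := by rfl

theorem pvOccRank_blocks : pvOccRank =
    (["police","sho","dgp","sp"].map (fun kw => (kw, 0))) ++
    (["magistrate","dm","sdm","collector","commissioner","official","secretary"].map (fun kw => (kw, 1))) ++
    (["mla","mp","minister","politician","party","leader","worker"].map (fun kw => (kw, 2))) ++
    (["judge","court","judicial"].map (fun kw => (kw, 3))) ++
    (["railway","defence","army"].map (fun kw => (kw, 4))) ++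
    (["advocate","lawyer"].map (fun kw => (kw, 5))) ++
    (["doctor","medical"].map (fun kw => (kw, 6))) ++
    (["principal","teacher","professor","school","college"].map (fun kw => (kw, 7))) ++
    (["editor","journalist","reporter","correspondent"].map (fun kw => (kw, 8))) ++
    (["manager","owner","proprietor","director","business"].map (fun kw => (kw, 9))) ++
    (["activist","social worker","ngo"].map (fun kw => (kw, 10))) := by rfl

-- ===== VERDICT (by name: the statement is the Claim_ definition above) =====
theorem extract_category_occupation_spec : Claim_equal_extract_category_occupation := by
  intro aff _
  unfold Spec_extract_category_occupation extract_category_occupation extract_category_occupation_alt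
  have h1 : ∀ (s : List Char) (b : Nat), pvScan1 pvCatRank s b
      = pvG (fun kw => PySem.Chars.isIn kw.toList s) pvCatRank b :=
    fun s b => pvScan1_eq_g _ _ _ (by decide)
  have h2 : ∀ (s : List Char) (b : Nat), pvScan1 pvOccRank s b
      = pvG (fun kw => PySem.Chars.isIn kw.toList s) pvOccRank b :=
    fun s b => pvScan1_eq_g _ _ _ (by decide)
  have hsc : ∀ (s : List Char) (bc bo : Nat), pvScan pvCatRank pvOccRank s bc bo
      = (pvScan1 pvCatRank s bc, pvScan1 pvOccRank s bo) :=
    fun s bc bo => pvScan_eq_pair _ _ _ _ _ (by decide) (by decide)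
  simp only [hsc, h1, h2]
  simp only [pvCatRank_blocks, pvOccRank_blocks, pvG_append, pvG_block, PySem.Str.isIn_eq]
  have h3 : (PySem.Chars.isIn "activist".toList (PySem.Str.lower aff).toList ||
      (PySem.Chars.isIn "social worker".toList (PySem.Str.lower aff).toList ||
       PySem.Chars.isIn "ngo".toList (PySem.Str.lower aff).toList))
      = ((["activist","social worker","ngo"] : List String).any
          (fun x => PySem.Chars.isIn x.toList (PySem.Str.lower aff).toList)) := by
    simp [List.any_cons]
  simp only [h3]
  rw [Prod.mk.injEq]
  constructor
  · obtain ⟨c0, hc0⟩ : ∃ c : Bool, ((["police","govt","government","ministry","department","magistrate","official","ias","ips"] : List String).any (fun x => PySem.Chars.isIn x.toList (PySem.Str.lower aff).toList)) = c := ⟨_, rfl⟩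
    obtain ⟨c1, hc1⟩ : ∃ c : Bool, ((["bjp","congress","party","mla","mp","politician","leader"] : List String).any (fun x => PySem.Chars.isIn x.toList (PySem.Str.lower aff).toList)) = c := ⟨_, rfl⟩
    obtain ⟨c2, hc2⟩ : ∃ c : Bool, ((["editor","journalist","reporter","press","media","news","channel","paper"] : List String).any (fun x => PySem.Chars.isIn x.toList (PySem.Str.lower aff).toList)) = c := ⟨_, rfl⟩
    obtain ⟨c3, hc3⟩ : ∃ c : Bool, ((["advocate","lawyer","legal","court"] : List String).any (fun x => PySem.Chars.isIn x.toList (PySem.Str.lower aff).toList)) = c := ⟨_, rfl⟩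
    obtain ⟨c4, hc4⟩ : ∃ c : Bool, ((["doctor","medical","hospital"] : List String).any (fun x => PySem.Chars.isIn x.toList (PySem.Str.lower aff).toList)) = c := ⟨_, rfl⟩
    obtain ⟨c5, hc5⟩ : ∃ c : Bool, ((["manager","owner","director","company","ltd","pvt","corporate"] : List String).any (fun x => PySem.Chars.isIn x.toList (PySem.Str.lower aff).toList)) = c := ⟨_, rfl⟩
    obtain ⟨c6, hc6⟩ : ∃ c : Bool, ((["ngo","society","association","union","activist"] : List String).any (fun x => PySem.Chars.isIn x.toList (PySem.Str.lower aff).toList)) = c := ⟨_, rfl⟩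
    simp only [hc0, hc1, hc2, hc3, hc4, hc5, hc6]
    clear hc0 hc1 hc2 hc3 hc4 hc5 hc6
    revert c0 c1 c2 c3 c4 c5 c6
    decide
  · obtain ⟨d0, hd0⟩ : ∃ c : Bool, ((["police","sho","dgp","sp"] : List String).any (fun x => PySem.Chars.isIn x.toList (PySem.Str.lower aff).toList)) = c := ⟨_, rfl⟩
    obtain ⟨d1, hd1⟩ : ∃ c : Bool, ((["magistrate","dm","sdm","collector","commissioner","official","secretary"] : List String).any (fun x => PySem.Chars.isIn x.toList (PySem.Str.lower aff).toList)) = c := ⟨_, rfl⟩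
    obtain ⟨d2, hd2⟩ : ∃ c : Bool, ((["mla","mp","minister","politician","party","leader","worker"] : List String).any (fun x => PySem.Chars.isIn x.toList (PySem.Str.lower aff).toList)) = c := ⟨_, rfl⟩
    obtain ⟨d3, hd3⟩ : ∃ c : Bool, ((["judge","court","judicial"] : List String).any (fun x => PySem.Chars.isIn x.toList (PySem.Str.lower aff).toList)) = c := ⟨_, rfl⟩
    obtain ⟨d4, hd4⟩ : ∃ c : Bool, ((["railway","defence","army"] : List String).any (fun x => PySem.Chars.isIn x.toList (PySem.Str.lower aff).toList)) = c := ⟨_, rfl⟩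
    obtain ⟨d5, hd5⟩ : ∃ c : Bool, ((["advocate","lawyer"] : List String).any (fun x => PySem.Chars.isIn x.toList (PySem.Str.lower aff).toList)) = c := ⟨_, rfl⟩
    obtain ⟨d6, hd6⟩ : ∃ c : Bool, ((["doctor","medical"] : List String).any (fun x => PySem.Chars.isIn x.toList (PySem.Str.lower aff).toList)) = c := ⟨_, rfl⟩
    obtain ⟨d7, hd7⟩ : ∃ c : Bool, ((["principal","teacher","professor","school","college"] : List String).any (fun x => PySem.Chars.isIn x.toList (PySem.Str.lower aff).toList)) = c := ⟨_, rfl⟩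
    obtain ⟨d8, hd8⟩ : ∃ c : Bool, ((["editor","journalist","reporter","correspondent"] : List String).any (fun x => PySem.Chars.isIn x.toList (PySem.Str.lower aff).toList)) = c := ⟨_, rfl⟩
    obtain ⟨d9, hd9⟩ : ∃ c : Bool, ((["manager","owner","proprietor","director","business"] : List String).any (fun x => PySem.Chars.isIn x.toList (PySem.Str.lower aff).toList)) = c := ⟨_, rfl⟩
    obtain ⟨d10, hd10⟩ : ∃ c : Bool, ((["activist","social worker","ngo"] : List String).any (fun x => PySem.Chars.isIn x.toList (PySem.Str.lower aff).toList)) = c := ⟨_, rfl⟩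
    simp only [hd0, hd1, hd2, hd3, hd4, hd5, hd6, hd7, hd8, hd9, hd10]
    clear hd0 hd1 hd2 hd3 hd4 hd5 hd6 hd7 hd8 hd9 hd10
    revert d0 d1 d2 d3 d4 d5 d6 d7 d8 d9 d10
    decide
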